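-- pv_equiv track=rewrite | github.com/argenkuz/sql_ai_bot | app.py | build_text_table
-- ===== SOURCE A (Python) =====
-- from typing import Any
--
-- MAX_PREVIEW_ROWS = 10
--
-- TABLE_COLUMN_WIDTH = 18
--
-- def truncate_text(value: Any, width: int = TABLE_COLUMN_WIDTH) -> str:
--     text = "" if value is None else str(value)
--     if len(text) <= width:
--         return text
--     return text[: width - 3] + "..."
--
-- def build_text_table(rows: list[dict[str, Any]], max_rows: int = MAX_PREVIEW_ROWS) -> str:
--     if not rows:
--         return "Нет данных."
--
--     preview_rows = rows[:max_rows]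
--     headers = list(preview_rows[0].keys())
--     widths: dict[str, int] = {}
--
--     for header in headers:
--         widths[header] = min(TABLE_COLUMN_WIDTH, max(len(header), 10))
--
--     for row in preview_rows:
--         for header in headers:
--             widths[header] = min(
--                 TABLE_COLUMN_WIDTH,
--                 max(widths[header], len(truncate_text(row.get(header), TABLE_COLUMN_WIDTH))),
--             )
--
--     header_line = " | ".join(header.ljust(widths[header]) for header in headers)
--     separator_line = "-+-".join("-" * widths[header] for header in headers)
--     body_lines = []
--
--     for row in preview_rows:
--         body_lines.append(
--             " | ".join(
--                 truncate_text(row.get(header), widths[header]).ljust(widths[header])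
--                 for header in headers
--             )
--         )
--
--     if len(rows) > max_rows:
--         body_lines.append(f"... показано {max_rows} из {len(rows)} строк")
--
--     return "\n".join([header_line, separator_line, *body_lines])
-- ===== SOURCE B (Python) =====
-- from typing import Any
--
-- MAX_PREVIEW_ROWS = 10
--
-- TABLE_COLUMN_WIDTH = 18
--
-- def truncate_text(value: Any, width: int = TABLE_COLUMN_WIDTH) -> str:
--     text = "" if value is None else str(value)
--     if len(text) <= width:
--         return text
--     return text[: width - 3] + "..."
--
-- def build_text_table(rows: list[dict[str, Any]], max_rows: int = MAX_PREVIEW_ROWS) -> str: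
--     if not rows:
--         return "Нет данных."
--
--     preview = rows[:max_rows]
--     headers = list(preview[0].keys())
--
--     # one pass per column: width, padded header, dashes and rendered cells together
--     columns = []
--     for header in headers:
--         cand = [len(header), 10] + [
--             len(truncate_text(r.get(header), TABLE_COLUMN_WIDTH)) for r in preview
--         ]
--         width = min(TABLE_COLUMN_WIDTH, max(cand))
--         cells = [truncate_text(r.get(header), width).ljust(width) for r in preview]
--         columns.append((header.ljust(width), "-" * width, cells))
--
--     lines = [
--         " | ".join(c[0] for c in columns),
--         "-+-".join(c[1] for c in columns),
--     ]
--     for i in range(len(preview)):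
--         lines.append(" | ".join(c[2][i] for c in columns))
--
--     if len(rows) > max_rows:
--         lines.append(f"... показано {max_rows} из {len(rows)} строк")
--
--     return "\n".join(lines)
-- ===== Notes on version B (the rewrite author's own statement) =====
-- stated objective: alternative
-- what changed: Column-oriented pipeline: each header's width is computed directly as min(18, max(candidates)) in one expression and its padded header, dash run and rendered cells are produced together per column, then body lines are re-assembled by index, replacing A's initialize-then-update widths dict and the separate row-major rendering rescan.
import Mathlib
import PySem

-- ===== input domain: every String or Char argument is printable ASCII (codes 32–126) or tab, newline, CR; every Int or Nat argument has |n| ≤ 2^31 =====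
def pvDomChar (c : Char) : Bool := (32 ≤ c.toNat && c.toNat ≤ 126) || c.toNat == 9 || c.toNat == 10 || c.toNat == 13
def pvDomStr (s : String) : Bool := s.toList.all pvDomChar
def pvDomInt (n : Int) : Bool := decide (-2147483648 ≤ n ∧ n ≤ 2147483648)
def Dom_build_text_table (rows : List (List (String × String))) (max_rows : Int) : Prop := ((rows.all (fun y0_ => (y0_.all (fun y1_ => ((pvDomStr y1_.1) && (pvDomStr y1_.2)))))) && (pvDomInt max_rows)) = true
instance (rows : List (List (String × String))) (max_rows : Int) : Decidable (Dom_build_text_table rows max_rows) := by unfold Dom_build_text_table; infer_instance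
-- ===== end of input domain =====

-- B re-organises the table computation column-by-column (direct width formula, fused
-- rendering, index transpose) instead of A's widths-dict update loops plus row-major
-- rescan; equal return value proved on Pre_ (A raises IndexError outside it).

-- shared module helper truncate_text(value, width), on List Char (value None/missing → "")
def pvTrunc (v : Option String) (width : Int) : List Char :=
  let text : List Char := (v.getD "").toList
  if (text.length : Int) ≤ width then text
  else PySem.List.slice text none (some (width - 3)) ++ ['.', '.', '.']

-- str.ljust(w): pad on the right with spaces to total width w (exact, incl. w ≤ len/0)
def pvLjust (cs : List Char) (w : Int) : List Char :=
  cs ++ List.replicate (w.toNat - cs.length) ' '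

-- row.get(header): association-list dict lookup (first match)
def pvGet (row : List (String × String)) (k : String) : Option String :=
  (row.find? (fun p => p.1 == k)).map (·.2)

-- ===== PORT A =====
def build_text_table (rows : List (List (String × String))) (max_rows : Int) : String :=
  if rows = [] then "Нет данных."
  else
    let preview := PySem.List.slice rows none (some max_rows)
    let headers := PySem.List.dedup ((preview.headD []).map Prod.fst)
    let widths0 : PySem.Dict String Int :=
      headers.foldl (fun d h => d.insert h (min 18 (max (h.toList.length : Int) 10))) PySem.Dict.empty
    let widths : PySem.Dict String Int :=
      preview.foldl (fun d row =>
        headers.foldl (fun d h =>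
          d.insert h (min 18 (max (d.getD h 0) ((pvTrunc (pvGet row h) 18).length : Int)))) d) widths0
    let header_line := PySem.Chars.join " | ".toList (headers.map (fun h => pvLjust h.toList (widths.getD h 0)))
    let separator_line := PySem.Chars.join "-+-".toList (headers.map (fun h => List.replicate (widths.getD h 0).toNat '-'))
    let body_lines : List (List Char) := preview.foldl (fun acc row =>
        acc ++ [PySem.Chars.join " | ".toList (headers.map (fun h =>
          pvLjust (pvTrunc (pvGet row h) (widths.getD h 0)) (widths.getD h 0)))]) []
    let body_lines := if (rows.length : Int) > max_rows then
        body_lines ++ [("... показано ".toList ++ PySem.Int.toChars max_rows ++ " из ".toList ++ PySem.Int.toChars (rows.length : Int) ++ " строк".toList)]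
      else body_lines
    String.ofList (PySem.Chars.join ['\n'] (header_line :: separator_line :: body_lines))

-- ===== PORT B =====
def build_text_table_alt (rows : List (List (String × String))) (max_rows : Int) : String :=
  if rows = [] then "Нет данных."
  else
    let preview := PySem.List.slice rows none (some max_rows)
    let headers := PySem.List.dedup ((preview.headD []).map Prod.fst)
    let columns : List (List Char × List Char × List (List Char)) :=
      headers.foldl (fun acc header =>
        let lens : List Int := preview.map (fun r => ((pvTrunc (pvGet r header) 18).length : Int))
        -- min(18, max(cand)) with cand = [len(header), 10] + lens (max of the nonempty
        -- literal list written as its running-max loop, PySem.List.max?_id_cons)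
        let width : Int := min 18 (((10 : Int) :: lens).foldl max (header.toList.length : Int))
        let cells := preview.map (fun r => pvLjust (pvTrunc (pvGet r header) width) width)
        acc ++ [(pvLjust header.toList width, List.replicate width.toNat '-', cells)]) []
    let lines : List (List Char) :=
      [PySem.Chars.join " | ".toList (columns.map (·.1)),
       PySem.Chars.join "-+-".toList (columns.map (·.2.1))]
    let lines := (PySem.List.pyRange 0 (preview.length : Int) 1).foldl (fun acc i =>
        acc ++ [PySem.Chars.join " | ".toList (columns.map (fun c => PySem.List.pyGetD c.2.2 i []))]) lines
    let lines := if (rows.length : Int) > max_rows then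
        lines ++ [("... показано ".toList ++ PySem.Int.toChars max_rows ++ " из ".toList ++ PySem.Int.toChars (rows.length : Int) ++ " строк".toList)]
      else lines
    String.ofList (PySem.Chars.join ['\n'] lines)

-- ===== PRECONDITION & SPEC =====
-- A (and B) raise IndexError on preview_rows[0] when rows is nonempty but rows[:max_rows]
-- is empty (max_rows = 0, or max_rows < 0 with len(rows) + max_rows ≤ 0); Pre_ excludes exactly that.
def Pre_build_text_table (rows : List (List (String × String))) (max_rows : Int) : Prop :=
  rows = [] ∨ 1 ≤ max_rows ∨ (max_rows ≤ -1 ∧ 1 ≤ (rows.length : Int) + max_rows)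
instance (rows : List (List (String × String))) (max_rows : Int) : Decidable (Pre_build_text_table rows max_rows) := by unfold Pre_build_text_table; infer_instance

def pvWitness_build_text_table : (List (List (String × String))) × Int := ([[("id", "1"), ("name", "ok")]], 5)

def Spec_build_text_table (rows : List (List (String × String))) (max_rows : Int) (out : String) : Prop := out = build_text_table_alt rows max_rows
instance (rows : List (List (String × String))) (max_rows : Int) (out : String) : Decidable (Spec_build_text_table rows max_rows out) := by unfold Spec_build_text_table; infer_instance

-- ===== CLAIM (what is proved, stated in full; the proofs are below) =====
def Claim_equal_build_text_table : Prop := ∀ (rows : List (List (String × String))) (max_rows : Int), Dom_build_text_table rows max_rows → Pre_build_text_table rows max_rows → Spec_build_text_table rows max_rows (build_text_table rows max_rows)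

-- ===== LEMMAS AND PROOFS =====

-- plain insert loop with key-only values: the final dict reads f k on the keys seen
theorem pv_getD_foldl_insert_fun (hs : List String) (d : PySem.Dict String Int)
    (f : String → Int) (k : String) :
    (hs.foldl (fun d h => d.insert h (f h)) d).getD k 0
      = if k ∈ hs then f k else d.getD k 0 := by
  induction hs generalizing d with
  | nil => simp
  | cons h t ih =>
      simp only [List.foldl_cons, ih, List.mem_cons]
      by_cases hk : k ∈ t
      · simp [hk]
      · by_cases he : k = h
        · subst he; simp [hk, PySem.Dict.getD_insert_self]
        · simp [hk, he, PySem.Dict.getD_insert]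

-- A's inner width-update loop over distinct headers, read back at k
theorem pv_getD_inner (hs : List String) (d : PySem.Dict String Int)
    (c : String → Int) (hnd : hs.Nodup) (k : String) :
    (hs.foldl (fun d h => d.insert h (min 18 (max (d.getD h 0) (c h)))) d).getD k 0
      = if k ∈ hs then min 18 (max (d.getD k 0) (c k)) else d.getD k 0 := by
  induction hs generalizing d with
  | nil => simp
  | cons h t ih =>
      rcases List.nodup_cons.mp hnd with ⟨hht, hndt⟩
      simp only [List.foldl_cons, ih _ hndt, List.mem_cons]
      by_cases hk : k ∈ t
      · have hne : k ≠ h := fun he => hht (he ▸ hk)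
        simp [hk, PySem.Dict.getD_insert, hne]
      · by_cases he : k = h
        · subst he; simp [hk, PySem.Dict.getD_insert_self]
        · simp [hk, he, PySem.Dict.getD_insert]

-- A's outer loop over rows, at a fixed header k ∈ hs
theorem pv_getD_outer (rs : List (List (String × String))) (hs : List String)
    (d : PySem.Dict String Int) (c : List (String × String) → String → Int)
    (hnd : hs.Nodup) (k : String) (hk : k ∈ hs) :
    ((rs.foldl (fun d row => hs.foldl (fun d h =>
        d.insert h (min 18 (max (d.getD h 0) (c row h)))) d) d).getD k 0)
      = rs.foldl (fun w row => min 18 (max w (c row k))) (d.getD k 0) := by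
  induction rs generalizing d with
  | nil => rfl
  | cons r t ih =>
      simp only [List.foldl_cons, ih]
      rw [pv_getD_inner _ _ _ hnd, if_pos hk]

-- capped running max: the 18-cap commutes out of the fold when every candidate ≤ 18
theorem pv_fold_minmax (cs : List Int) (m0 : Int) (hc : ∀ x ∈ cs, x ≤ 18) :
    cs.foldl (fun w x => min 18 (max w x)) (min 18 m0) = min 18 (cs.foldl max m0) := by
  induction cs generalizing m0 with
  | nil => rfl
  | cons x t ih =>
      have hx : x ≤ 18 := hc x (by simp)
      have : min 18 (max (min 18 m0) x) = min 18 (max m0 x) := by omega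
      simp only [List.foldl_cons, this]
      exact ih _ (fun y hy => hc y (by simp [hy]))

theorem pv_trunc_len_le (v : Option String) : ((pvTrunc v 18).length : Int) ≤ 18 := by
  unfold pvTrunc
  simp only []
  split
  · omega
  · rw [show ((18 : Int) - 3) = ((15 : Nat) : Int) by norm_num,
      PySem.List.slice_to_natCast]
    simp only [List.length_append, List.length_take, List.length_cons, List.length_nil]
    omega

-- mapping a list = mapping its index range through getD
theorem pv_map_eq_map_range {α β : Type} [Inhabited α] (l : List α) (F : α → β) :
    l.map F = (List.range l.length).map (fun i => F (l.getD i default)) := by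
  apply List.ext_getElem
  · simp
  · intro i h1 h2
    simp [List.getD_eq_getElem?_getD, List.getElem?_eq_getElem (by simpa using h2)]

-- A's widths-dict value at a header equals B's direct one-expression width
theorem pv_widths_eq (preview : List (List (String × String))) (hs : List String)
    (hnd : hs.Nodup) (h : String) (hmem : h ∈ hs) :
    ((preview.foldl (fun d row => hs.foldl (fun d hh =>
          d.insert hh (min 18 (max (d.getD hh 0) ((pvTrunc (pvGet row hh) 18).length : Int)))) d)
        (hs.foldl (fun d hh => d.insert hh (min 18 (max (hh.toList.length : Int) 10)))
          PySem.Dict.empty)).getD h 0)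
      = min 18 (((10 : Int) ::
          preview.map (fun r => ((pvTrunc (pvGet r h) 18).length : Int))).foldl max
            (h.toList.length : Int)) := by
  rw [pv_getD_outer _ _ _ _ hnd _ hmem, pv_getD_foldl_insert_fun, if_pos hmem]
  rw [← List.foldl_map (f := fun r => ((pvTrunc (pvGet r h) 18).length : Int))
        (g := fun w x => min 18 (max w x))]
  rw [pv_fold_minmax _ _ ?_]
  · simp [List.foldl_cons]
  · intro x hx
    simp only [List.mem_map] at hx
    obtain ⟨r, -, hr⟩ := hx
    exact hr ▸ pv_trunc_len_le _

-- ===== VERDICT (by name: the statement is the Claim_ definition above) =====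
theorem build_text_table_spec : Claim_equal_build_text_table := by
  intro rows max_rows _ hpre
  unfold Spec_build_text_table build_text_table build_text_table_alt
  by_cases hnil : rows = []
  · simp [hnil]
  · simp only [if_neg hnil]
    set preview := PySem.List.slice rows none (some max_rows) with hprev
    set hs := PySem.List.dedup ((preview.headD []).map Prod.fst) with hhs
    have hnd : hs.Nodup := PySem.List.nodup_dedup _
    -- the per-header width, as B computes it
    set wB : String → Int := fun h => min 18 (((10 : Int) ::
        preview.map (fun r => ((pvTrunc (pvGet r h) 18).length : Int))).foldl max
          (h.toList.length : Int)) with hwB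
    have hw : ∀ h ∈ hs,
        ((preview.foldl (fun d row => hs.foldl (fun d hh =>
              d.insert hh (min 18 (max (d.getD hh 0) ((pvTrunc (pvGet row hh) 18).length : Int)))) d)
            (hs.foldl (fun d hh => d.insert hh (min 18 (max (hh.toList.length : Int) 10)))
              PySem.Dict.empty)).getD h 0) = wB h :=
      fun h hm => pv_widths_eq preview hs hnd h hm
    -- B's column loop is a map over the headers
    rw [PySem.List.foldl_append_singleton_eq_map
          (f := fun header =>
            (pvLjust header.toList (wB header),
             List.replicate (wB header).toNat '-',
             preview.map (fun r => pvLjust (pvTrunc (pvGet r header) (wB header)) (wB header))))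
          hs []]
    rw [List.nil_append]
    -- A's body loop is a map over the preview rows; B's index loop is a map over the range
    rw [PySem.List.foldl_append_singleton_eq_map (l := preview) (acc := [])]
    rw [PySem.List.foldl_append_singleton_eq_map
          (l := PySem.List.pyRange 0 (preview.length : Int) 1)]
    rw [PySem.List.pyRange_zero_nat]
    congr 1
    -- reduce to equality of the two line lists
    have hbody : preview.map (fun row => PySem.Chars.join " | ".toList (hs.map (fun h =>
          pvLjust (pvTrunc (pvGet row h)
              ((preview.foldl (fun d row => hs.foldl (fun d hh =>
                  d.insert hh (min 18 (max (d.getD hh 0) ((pvTrunc (pvGet row hh) 18).length : Int)))) d)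
                (hs.foldl (fun d hh => d.insert hh (min 18 (max (hh.toList.length : Int) 10)))
                  PySem.Dict.empty)).getD h 0))
            ((preview.foldl (fun d row => hs.foldl (fun d hh =>
                  d.insert hh (min 18 (max (d.getD hh 0) ((pvTrunc (pvGet row hh) 18).length : Int)))) d)
                (hs.foldl (fun d hh => d.insert hh (min 18 (max (hh.toList.length : Int) 10)))
                  PySem.Dict.empty)).getD h 0))))
        = (List.range preview.length).map (fun i => PySem.Chars.join " | ".toList
            ((hs.map (fun header =>
              (pvLjust header.toList (wB header),
               List.replicate (wB header).toNat '-',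
               preview.map (fun r => pvLjust (pvTrunc (pvGet r header) (wB header)) (wB header))))).map
              (fun c => PySem.List.pyGetD c.2.2 (((i : Nat) : Int)) []))) := by
      rw [pv_map_eq_map_range (l := preview)]
      apply List.map_congr_left
      intro i hi
      have hilt : i < preview.length := by simpa using hi
      congr 1
      rw [List.map_map]
      apply List.map_congr_left
      intro h hm
      simp only [Function.comp_apply, PySem.List.pyGetD_natCast,
        hw h hm]
      rw [List.getD_eq_getElem _ _ (by simpa using hilt)]
      simp [List.getElem?_eq_getElem hilt]
    -- assemble: header line, separator line, body lines, footer
    rw [hbody]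
    split_ifs with hfoot <;>
    · simp only [List.map_map, List.nil_append, List.cons_append]
      congr 1
      congr 1
      · congr 1
        exact List.map_congr_left (fun h hm => by simp only [Function.comp_apply]; rw [hw h hm])
      · congr 2
        exact List.map_congr_left (fun h hm => by simp only [Function.comp_apply]; rw [hw h hm])
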